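-- pv_equiv track=rewrite | github.com/pypi-data/pypi-mirror-147 | packages/ultimate-parser/ultimate-parser-0.4.tar.gz/ultimate-parser-0.4/ultimate_parser/parser.py | get_spaces
-- ===== SOURCE A (Python) =====
-- def get_spaces(text: str) -> int:
--     length = len(text.split("\n"))
--     out = 0
--
--     if length > 1 or length < 1: return
--
--     for i in text.split("\n")[0]:
--         if i == " ":
--             out += 1
--         if i == "<":
--             break
--
--     return out
-- ===== SOURCE B (Python) =====
-- def get_spaces(text: str) -> int:
--     if "\n" in text:
--         return None
--     return text.split("<", 1)[0].count(" ")
-- ===== Notes on version B (the rewrite author's own statement) =====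
-- stated objective: simpler
-- what changed: Replaces the fused per-character loop (accumulate spaces, break at the delimiter) with two builtin passes: split off the prefix before the first delimiter with split(maxsplit 1), then count the spaces in it; the newline guard uses the in operator instead of counting the pieces of a full split.
import Mathlib
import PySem

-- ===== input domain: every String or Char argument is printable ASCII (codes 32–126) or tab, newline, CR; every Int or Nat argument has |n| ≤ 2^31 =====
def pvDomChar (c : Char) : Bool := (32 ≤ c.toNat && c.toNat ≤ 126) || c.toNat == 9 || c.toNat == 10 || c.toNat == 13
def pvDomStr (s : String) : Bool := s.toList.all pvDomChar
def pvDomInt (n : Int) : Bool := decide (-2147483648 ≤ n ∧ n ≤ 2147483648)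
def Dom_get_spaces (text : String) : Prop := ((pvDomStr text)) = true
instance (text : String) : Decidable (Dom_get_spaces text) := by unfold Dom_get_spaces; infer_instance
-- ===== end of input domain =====

-- B replaces A's fused character loop (count spaces, break on '<') by two separate builtin
-- passes: split off the prefix before the first '<' with split("<", 1), then count its spaces.


-- ===== PORT A =====
-- 'for i in text.split("\n")[0]: if i == " ": out += 1; if i == "<": break'
def get_spacesLoop : List Char → Int → Int
  | [], out => out
  | c :: cs, out =>
      let out' := if c = ' ' then out + 1 else out
      if c = '<' then out' else get_spacesLoop cs out'

-- A: length = len(text.split("\n")); return (None) when length > 1 or length < 1; else loop.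
def get_spaces (text : String) : Option Int :=
  match PySem.Str.split? text "\n" with
  | none => none  -- unreachable: the separator "\n" is nonempty
  | some parts =>
      let length : Int := (parts.length : Int)
      if length > 1 ∨ length < 1 then none
      else
        match PySem.List.pyGet? parts 0 with
        | none => none  -- unreachable: split always returns a nonempty list
        | some first => some (get_spacesLoop first.toList 0)

-- ===== PORT B =====
-- 'if "\n" in text: return None' ; 'return text.split("<", 1)[0].count(" ")'
def get_spaces_alt (text : String) : Option Int :=
  if PySem.Str.isIn "\n" text then none
  else
    match PySem.Str.splitMax? text "<" 1 with
    | none => none  -- unreachable: the separator "<" is nonempty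
    | some parts =>
        match PySem.List.pyGet? parts 0 with
        | none => none  -- unreachable: the separator "<" is nonempty
        | some pre => some ((PySem.Str.count pre " " : Int))

-- ===== PRECONDITION & SPEC =====
def Spec_get_spaces (text : String) (out : Option Int) : Prop := out = get_spaces_alt text
instance (text : String) (out : Option Int) : Decidable (Spec_get_spaces text out) := by unfold Spec_get_spaces; infer_instance

-- ===== CLAIM (what is proved, stated in full; the proofs are below) =====
def Claim_equal_get_spaces : Prop := ∀ (text : String), Dom_get_spaces text → Spec_get_spaces text (get_spaces text)

-- ===== LEMMAS AND PROOFS =====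

theorem splitOn_go_len_ge (sep : List Char) (fuel : Nat) (l cur : List Char) (acc : List (List Char)) :
    acc.length + 1 ≤ (PySem.Chars.splitOn.go sep fuel l cur acc).length := by
  induction fuel generalizing l cur acc with
  | zero => simp [PySem.Chars.splitOn.go]
  | succ n ih =>
    cases l with
    | nil => simp [PySem.Chars.splitOn.go]
    | cons c rest =>
      rw [PySem.Chars.splitOn.go]
      by_cases hp : sep.isPrefixOf (c :: rest) = true
      · rw [if_pos hp]
        have := ih (List.drop sep.length (c :: rest)) [] (cur.reverse :: acc)
        simp at this ⊢
        omega
      · rw [if_neg hp]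
        exact ih rest (c :: cur) acc

theorem splitOn_go_not_mem (a : Char) (fuel : Nat) (l cur : List Char) (acc : List (List Char))
    (h : a ∉ l) :
    PySem.Chars.splitOn.go [a] fuel l cur acc = ((cur.reverse ++ l) :: acc).reverse := by
  induction fuel generalizing l cur with
  | zero => rw [PySem.Chars.splitOn.go]
  | succ n ih =>
    cases l with
    | nil => rw [PySem.Chars.splitOn.go]; simp; omega
    | cons c rest =>
      have hne : a ≠ c := fun hc => h (hc ▸ List.mem_cons_self)
      have hpre : [a].isPrefixOf (c :: rest) = false := by
        simp [List.isPrefixOf]; exact hne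
      rw [PySem.Chars.splitOn.go, if_neg (by simp [hpre])]
      rw [ih rest (c :: cur) (fun hm => h (List.mem_cons_of_mem _ hm))]
      simp

theorem splitOn_go_mem_len (a : Char) (fuel : Nat) (l cur : List Char) (acc : List (List Char))
    (hf : l.length ≤ fuel) (h : a ∈ l) :
    2 + acc.length ≤ (PySem.Chars.splitOn.go [a] fuel l cur acc).length := by
  induction fuel generalizing l cur acc with
  | zero => cases l with
    | nil => simp at h
    | cons c rest => simp at hf
  | succ n ih =>
    cases l with
    | nil => simp at h
    | cons c rest =>
      rw [PySem.Chars.splitOn.go]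
      by_cases hc : a = c
      · have hpre : [a].isPrefixOf (c :: rest) = true := by
          simp [List.isPrefixOf]; exact hc
        rw [if_pos hpre]
        have := splitOn_go_len_ge [a] n (List.drop 1 (c :: rest)) [] (cur.reverse :: acc)
        simp at this ⊢
        omega
      · have hpre : [a].isPrefixOf (c :: rest) = false := by
          simp [List.isPrefixOf]; exact hc
        rw [if_neg (by simp [hpre])]
        have hm : a ∈ rest := by
          cases h with
          | head => exact absurd rfl hc
          | tail _ hm => exact hm
        exact ih rest (c :: cur) acc (by simp at hf ⊢; omega) hm

theorem splitOnMax_go_zero (sep : List Char) (fuel : Nat) (l cur : List Char) (acc : List (List Char)) :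
    PySem.Chars.splitOnMax.go sep fuel 0 l cur acc = ((cur.reverse ++ l) :: acc).reverse := by
  cases fuel with
  | zero => rw [PySem.Chars.splitOnMax.go]
  | succ n =>
    cases l with
    | nil => rw [PySem.Chars.splitOnMax.go]; simp; omega
    | cons c rest => rw [PySem.Chars.splitOnMax.go]; simp

theorem splitOnMax_go_head (a : Char) (fuel : Nat) (l cur : List Char)
    (hf : l.length ≤ fuel) :
    (PySem.Chars.splitOnMax.go [a] fuel 1 l cur []).head? =
      some (cur.reverse ++ l.takeWhile (· ≠ a)) := by
  induction fuel generalizing l cur with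
  | zero => cases l with
    | nil => rw [PySem.Chars.splitOnMax.go]; simp
    | cons c rest => simp at hf
  | succ n ih =>
    cases l with
    | nil => rw [PySem.Chars.splitOnMax.go]; simp; omega
    | cons c rest =>
      rw [PySem.Chars.splitOnMax.go]
      by_cases hc : a = c
      · have hpre : [a].isPrefixOf (c :: rest) = true := by
          simp [List.isPrefixOf]; exact hc
        rw [if_neg (by omega), if_pos hpre, splitOnMax_go_zero]
        simp [List.takeWhile, hc.symm]
      · have hpre : [a].isPrefixOf (c :: rest) = false := by
          simp [List.isPrefixOf]; exact hc
        rw [if_neg (by omega), if_neg (by simp [hpre])]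
        rw [ih rest (c :: cur) (by simp at hf ⊢; omega)]
        have : c ≠ a := fun hh => hc hh.symm
        simp [List.takeWhile, this]

theorem count_go_single (a : Char) (fuel : Nat) (l : List Char) (acc : Nat)
    (hf : l.length ≤ fuel) :
    PySem.Chars.count.go [a] fuel l acc = acc + l.count a := by
  induction fuel generalizing l acc with
  | zero => cases l with
    | nil => rw [PySem.Chars.count.go]; simp
    | cons c rest => simp at hf
  | succ n ih =>
    cases l with
    | nil => rw [PySem.Chars.count.go]; simp; omega
    | cons c rest =>
      rw [PySem.Chars.count.go]
      by_cases hc : a = c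
      · have hpre : [a].isPrefixOf (c :: rest) = true := by
          simp [List.isPrefixOf]; exact hc
        rw [if_pos hpre]
        have hd : List.drop [a].length (c :: rest) = rest := by simp
        rw [hd]
        rw [ih rest (acc + 1) (by simp at hf ⊢; omega)]
        simp [hc.symm]
        omega
      · have hpre : [a].isPrefixOf (c :: rest) = false := by
          simp [List.isPrefixOf]; exact hc
        rw [if_neg (by simp [hpre]), ih rest acc (by simp at hf ⊢; omega)]
        have : ¬ (c = a) := fun hh => hc hh.symm
        simp [this]


theorem get_spacesLoop_eq (l : List Char) (out : Int) :
    get_spacesLoop l out = out + ((l.takeWhile (· ≠ '<')).count ' ' : Int) := by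
  induction l generalizing out with
  | nil => simp [get_spacesLoop]
  | cons c rest ih =>
    by_cases hc : c = '<'
    · have hs : c ≠ ' ' := by simp [hc]
      simp [get_spacesLoop, hc, List.takeWhile]
    · simp only [get_spacesLoop, if_neg hc]
      rw [ih]
      by_cases hs : c = ' '
      · simp [hs, List.takeWhile]
        ring
      · simp [hs, hc, List.takeWhile]

theorem singleton_infix_iff (a : Char) (l : List Char) : [a] <:+: l ↔ a ∈ l := by
  constructor
  · intro h
    exact (List.singleton_sublist).1 h.sublist
  · intro h
    obtain ⟨s, t, rfl⟩ := List.append_of_mem h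
    exact ⟨s, t, by simp⟩




theorem count_single (a : Char) (l : List Char) :
    PySem.Chars.count l [a] = l.count a := by
  unfold PySem.Chars.count
  simp only [List.isEmpty, Bool.false_eq_true, if_false]
  simpa using count_go_single a l.length l 0 (le_refl _)

-- ===== VERDICT (by name: the statement is the Claim_ definition above) =====
theorem get_spaces_spec : Claim_equal_get_spaces := by
  intro text _
  unfold Spec_get_spaces
  by_cases h : '\n' ∈ text.toList
  · have hin : PySem.Str.isIn "\n" text = true := by
      rw [PySem.Str.isIn_iff_infix]
      exact (singleton_infix_iff '\n' text.toList).2 (by simpa using h)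
    have hlen := splitOn_go_mem_len '\n' (text.toList.length + 1) text.toList [] [] (by omega) h
    simp only [List.length_nil] at hlen
    have hlen' : 2 ≤ (PySem.Chars.splitOn.go ['\n'] (text.length + 1) text.toList [] []).length := by
      simpa using hlen
    unfold get_spaces get_spaces_alt
    rw [hin]
    simp only [PySem.Str.split?, PySem.Chars.split?, PySem.Chars.splitOn,
      show ("\n":String).toList = ['\n'] from rfl]
    rw [if_neg (by simp), if_true]
    simp only [Option.map_some]
    rw [if_pos (by simp only [List.length_map]; omega)]
  · have hin : PySem.Str.isIn "\n" text = false := by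
      by_contra hh
      rw [Bool.not_eq_false, PySem.Str.isIn_iff_infix] at hh
      exact h ((singleton_infix_iff '\n' text.toList).1 (by simpa using hh))
    unfold get_spaces get_spaces_alt
    rw [hin]
    simp only [PySem.Str.split?, PySem.Chars.split?, PySem.Str.splitMax?, PySem.Chars.splitMax?,
      PySem.Chars.splitOn, PySem.Chars.splitOnMax,
      show ("\n":String).toList = ['\n'] from rfl, show ("<":String).toList = ['<'] from rfl]
    rw [if_neg (show ¬ (['\n'].isEmpty = true) by simp),
        if_neg (show ¬ (['<'].isEmpty = true) by simp),
        if_neg (show ¬ ((1:Int) < 0) by omega)]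
    rw [splitOn_go_not_mem '\n' _ text.toList [] [] h]
    have hhead := splitOnMax_go_head '<' (text.toList.length + 1) text.toList [] (by omega)
    obtain ⟨tail, htail⟩ := List.head?_eq_some_iff.1 hhead
    simp only [Int.toNat_one] at htail ⊢
    rw [htail]
    simp only [List.reverse_cons, List.reverse_nil, List.nil_append, List.map_cons, List.map_nil,
      List.length_cons, List.length_nil, Option.map_some, Bool.false_eq_true, if_false]
    rw [if_neg (by norm_num)]
    rw [PySem.List.pyGet?_zero_cons, PySem.List.pyGet?_zero_cons]
    simp only [Option.some.injEq]
    rw [get_spacesLoop_eq]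
    have hc : PySem.Str.count (String.ofList (List.takeWhile (fun x => x ≠ '<') text.toList)) " "
        = (List.takeWhile (fun x => x ≠ '<') text.toList).count ' ' := by
      rw [PySem.Str.count_eq]
      simp only [show (" ":String).toList = [' '] from rfl]
      rw [show (String.ofList (List.takeWhile (fun x => x ≠ '<') text.toList)).toList
            = List.takeWhile (fun x => x ≠ '<') text.toList by simp]
      exact count_single ' ' _
    rw [hc]
    simp
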